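-- pv_equiv track=rewrite | github.com/tlsim/pi-pianoteq | src/pi_pianoteq/midi/util.py | program_numbers_by_channel
-- ===== SOURCE A (Python) =====
-- from typing import Iterator, Tuple
--
-- def program_numbers_by_channel(from_channel: int = 0) -> Iterator[Tuple[int, int]]:
--     program_number = 0
--     channel_number = from_channel
--     while channel_number < 16:
--         while program_number < 128:
--             yield (channel_number, program_number)
--             program_number += 1
--         program_number = 0
--         channel_number += 1
-- ===== SOURCE B (Python) =====
-- def program_numbers_by_channel(from_channel: int = 0):
--     for i in range(from_channel * 128, 16 * 128):
--         yield (i // 128, i % 128)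
-- ===== Notes on version B (the rewrite author's own statement) =====
-- stated objective: simpler
-- what changed: Replaced the nested while loops maintaining two counters with a single flat loop over one linear index, recovering channel and program via floor-division and modulus.
import Mathlib
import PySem

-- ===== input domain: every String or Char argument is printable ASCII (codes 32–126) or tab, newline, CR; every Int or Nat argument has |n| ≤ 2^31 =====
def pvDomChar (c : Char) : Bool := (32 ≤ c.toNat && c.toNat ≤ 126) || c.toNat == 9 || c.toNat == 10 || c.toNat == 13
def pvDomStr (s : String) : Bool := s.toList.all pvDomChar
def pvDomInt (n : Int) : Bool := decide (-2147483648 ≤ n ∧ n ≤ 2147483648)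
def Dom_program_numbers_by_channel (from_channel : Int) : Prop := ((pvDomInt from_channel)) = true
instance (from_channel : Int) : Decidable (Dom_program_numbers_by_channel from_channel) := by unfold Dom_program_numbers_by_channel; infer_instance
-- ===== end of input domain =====

-- ===== PORT A =====
-- header: B replaces A's nested while loops (two counters) with one flat loop over a
-- linear index, recovering (channel, program) by divmod; objective: simpler.
-- A is a generator; both ports return the list of yielded pairs.

-- inner 'while program_number < 128: yield (c, p); p += 1'
def pnInnerA (c p : Int) : List (Int × Int) :=
  if h : p < 128 then (c, p) :: pnInnerA c (p + 1) else []
termination_by (128 - p).toNat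
decreasing_by omega

-- outer 'while channel_number < 16: <inner with p>; p = 0; c += 1'
def pnOuterA (c p : Int) : List (Int × Int) :=
  if _h : c < 16 then pnInnerA c p ++ pnOuterA (c + 1) 0 else []
termination_by (16 - c).toNat
decreasing_by omega

def program_numbers_by_channel (from_channel : Int) : List (Int × Int) :=
  pnOuterA from_channel 0

-- ===== PORT B =====
def program_numbers_by_channel_alt (from_channel : Int) : List (Int × Int) :=
  (PySem.List.pyRange (from_channel * 128) (16 * 128) 1).map
    (fun i => (PySem.Int.floordiv i 128, PySem.Int.mod i 128))

-- ===== PRECONDITION & SPEC =====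
def Spec_program_numbers_by_channel (from_channel : Int) (out : List (Int × Int)) : Prop := out = program_numbers_by_channel_alt from_channel
instance (from_channel : Int) (out : List (Int × Int)) : Decidable (Spec_program_numbers_by_channel from_channel out) := by unfold Spec_program_numbers_by_channel; infer_instance

-- ===== CLAIM (what is proved, stated in full; the proofs are below) =====
def Claim_equal_program_numbers_by_channel : Prop := ∀ (from_channel : Int), Dom_program_numbers_by_channel from_channel → Spec_program_numbers_by_channel from_channel (program_numbers_by_channel from_channel)

-- ===== LEMMAS AND PROOFS =====

-- A's inner loop enumerates p, p+1, …, 127 paired with c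
theorem pnInnerA_eq (c p : Int) :
    pnInnerA c p = (PySem.List.pyRange p 128 1).map (fun k => (c, k)) := by
  by_cases h : p < 128
  · rw [pnInnerA, PySem.List.pyRange_one_cons h]
    simp only [h, dif_pos, List.map_cons]
    exact congrArg _ (pnInnerA_eq c (p + 1))
  · rw [pnInnerA, PySem.List.pyRange_one_eq_nil (by omega)]
    simp [h]
termination_by (128 - p).toNat
decreasing_by omega

-- one chunk of B's flat range maps to A's inner list
theorem pn_chunk (c : Int) :
    (PySem.List.pyRange (c * 128) (c * 128 + 128) 1).map
        (fun i => (PySem.Int.floordiv i 128, PySem.Int.mod i 128)) =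
      pnInnerA c 0 := by
  rw [pnInnerA_eq, PySem.List.pyRange_one, PySem.List.pyRange_one]
  simp only [List.map_map]
  have e1 : c * 128 + 128 - c * 128 = (128:Int) := by ring
  rw [e1]
  norm_num
  intro k hk
  omega

theorem pnOuterA_eq (c : Int) :
    pnOuterA c 0 = (PySem.List.pyRange (c * 128) (16 * 128) 1).map
      (fun i => (PySem.Int.floordiv i 128, PySem.Int.mod i 128)) := by
  by_cases h : c < 16
  · rw [pnOuterA,
      PySem.List.pyRange_one_append (c * 128) (c * 128 + 128) (16 * 128)
        (by omega) (by omega)]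
    simp only [h, dif_pos, List.map_append, pn_chunk, pnOuterA_eq (c + 1)]
    have : (c + 1) * 128 = c * 128 + 128 := by ring
    rw [this]
  · rw [pnOuterA, PySem.List.pyRange_one_eq_nil (by omega)]
    simp [h]
termination_by (16 - c).toNat
decreasing_by omega

-- ===== VERDICT (by name: the statement is the Claim_ definition above) =====
theorem program_numbers_by_channel_spec : Claim_equal_program_numbers_by_channel := by
  intro fc _
  unfold Spec_program_numbers_by_channel program_numbers_by_channel program_numbers_by_channel_alt
  exact pnOuterA_eq fc
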